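-- pv_equiv track=rewrite | github.com/nicogits92/seafile-deploy | scripts/config-ui/seafile-config-ui.py | _env_quote
-- ===== SOURCE A (Python) =====
-- def _env_quote(val):
--     """Quote a value for safe .env writing. Escapes special characters."""
--     needs_quote = any(c in val for c in ' #;$`"\\')
--     if not needs_quote:
--         return val
--     # Escape backslashes first, then double quotes, $, and backticks
--     val = val.replace('\\', '\\\\')
--     val = val.replace('"', '\\"')
--     val = val.replace('$', '\\$')
--     val = val.replace('`', '\\`')
--     return f'"{val}"'
-- ===== SOURCE B (Python) =====
-- def _env_quote(val):
--     """Quote a value for safe .env writing. Escapes special characters."""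
--     esc = {'\\': '\\\\', '"': '\\"', '$': '\\$', '`': '\\`'}
--     buf = []
--     needs_quote = False
--     for c in val:
--         buf.append(esc.get(c, c))
--         if c in ' #;$`"\\':
--             needs_quote = True
--     if not needs_quote:
--         return val
--     return '"' + ''.join(buf) + '"'
-- ===== Notes on version B (the rewrite author's own statement) =====
-- stated objective: simpler
-- what changed: Replaces the detection scan plus four sequential .replace passes with one single pass over the string that simultaneously records whether quoting is needed and builds the escaped text via a per-character escape table.
import Mathlib
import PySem

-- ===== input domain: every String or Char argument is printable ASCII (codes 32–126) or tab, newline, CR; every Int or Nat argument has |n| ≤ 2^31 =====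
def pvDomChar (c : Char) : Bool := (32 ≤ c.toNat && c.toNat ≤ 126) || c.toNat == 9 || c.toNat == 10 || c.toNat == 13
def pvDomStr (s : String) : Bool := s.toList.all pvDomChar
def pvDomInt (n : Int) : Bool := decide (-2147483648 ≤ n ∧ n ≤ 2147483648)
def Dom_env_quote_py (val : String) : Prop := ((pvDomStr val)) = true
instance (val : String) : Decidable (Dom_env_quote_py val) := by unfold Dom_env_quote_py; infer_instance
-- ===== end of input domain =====

-- B replaces A's detection scan plus four sequential replace passes by one single pass that
-- builds the escaped text from a per-character table and records whether quoting is needed (simpler).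


-- ===== PORT A =====
-- any(c in val for c in ' #;$`"\'): iterate the special characters, test substring membership
def env_quote_py (val : String) : String :=
  let needs_quote := [' ', '#', ';', '$', '`', '"', '\\'].any
    (fun c => PySem.Str.isIn (String.ofList [c]) val)
  if !needs_quote then val
  else
    let v1 := PySem.Str.replace val "\\" "\\\\"
    let v2 := PySem.Str.replace v1 "\"" "\\\""
    let v3 := PySem.Str.replace v2 "$" "\\$"
    let v4 := PySem.Str.replace v3 "`" "\\`"
    "\"" ++ v4 ++ "\""

-- ===== PORT B =====
-- esc.get(c, c): the four-entry escape table as a function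
def pvEsc (c : Char) : List Char :=
  if c = '\\' then ['\\', '\\']
  else if c = '"' then ['\\', '"']
  else if c = '$' then ['\\', '$']
  else if c = '`' then ['\\', '`']
  else [c]

def env_quote_py_alt (val : String) : String :=
  let st := val.toList.foldl
    (fun (st : List Char × Bool) c =>
      (st.1 ++ pvEsc c, st.2 || decide (c ∈ [' ', '#', ';', '$', '`', '"', '\\'])))
    ([], false)
  if !st.2 then val
  else String.ofList ('"' :: st.1 ++ ['"'])

-- ===== PRECONDITION & SPEC =====
def Spec_env_quote_py (val : String) (out : String) : Prop := out = env_quote_py_alt val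
instance (val : String) (out : String) : Decidable (Spec_env_quote_py val out) := by unfold Spec_env_quote_py; infer_instance

-- ===== CLAIM (what is proved, stated in full; the proofs are below) =====
def Claim_equal_env_quote_py : Prop := ∀ (val : String), Dom_env_quote_py val → Spec_env_quote_py val (env_quote_py val)

-- ===== LEMMAS AND PROOFS =====

-- single-character old: replace is a flatMap over the characters
theorem replace_go_single (o : Char) (new : List Char) :
    ∀ (fuel : Nat) (l acc : List Char), l.length ≤ fuel →
      PySem.Chars.replace.go [o] new fuel l acc
        = acc.reverse ++ l.flatMap (fun c => if c = o then new else [c]) := by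
  intro fuel
  induction fuel with
  | zero =>
    intro l acc h
    cases l with
    | nil => simp [PySem.Chars.replace.go]
    | cons c t => simp at h
  | succ n ih =>
    intro l acc h
    cases l with
    | nil => simp [PySem.Chars.replace.go]
    | cons c t =>
      by_cases hc : c = o
      · subst hc
        have hpre : [c].isPrefixOf (c :: t) = true := by simp [List.isPrefixOf]
        rw [PySem.Chars.replace.go, if_pos hpre]
        simp only [List.length_cons] at h
        rw [ih _ _ (by simp; omega)]
        simp
      · have hpre : [o].isPrefixOf (c :: t) = false := by
          simp [List.isPrefixOf]
          exact fun h' => (hc h'.symm).elim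
        rw [PySem.Chars.replace.go, if_neg (by simp [hpre])]
        simp only [List.length_cons] at h
        rw [ih _ _ (by omega)]
        simp [hc]

theorem replace_single (s : List Char) (o : Char) (new : List Char) :
    PySem.Chars.replace s [o] new = s.flatMap (fun c => if c = o then new else [c]) := by
  rw [PySem.Chars.replace]
  simp only [List.isEmpty_cons, if_false, Bool.false_eq_true]
  exact replace_go_single o new s.length s [] Nat.le.refl

-- substring test of a single character is list membership
theorem isIn_single (c : Char) (s : List Char) :
    PySem.Chars.isIn [c] s = s.contains c := by
  by_cases h : c ∈ s
  · rw [(PySem.Chars.isIn_iff_infix [c] s).mpr, List.contains_iff_mem.mpr h]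
    obtain ⟨l, r, rfl⟩ := List.append_of_mem h
    exact ⟨l, r, by simp⟩
  · have : ¬ ([c] <:+: s) := by
      intro hi
      exact h (hi.subset (by simp))
    rw [(PySem.Chars.isIn_eq_false_iff [c] s).mpr this]
    simp [h]

-- the single pass accumulates the flatMap and the any
theorem foldl_pass (l : List Char) :
    ∀ (acc : List Char) (b : Bool),
      l.foldl (fun (st : List Char × Bool) c =>
          (st.1 ++ pvEsc c, st.2 || decide (c ∈ [' ', '#', ';', '$', '`', '"', '\\']))) (acc, b)
        = (acc ++ l.flatMap pvEsc,
           b || l.any (fun c => decide (c ∈ [' ', '#', ';', '$', '`', '"', '\\']))) := by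
  induction l with
  | nil => intro acc b; simp
  | cons c t ih =>
    intro acc b
    simp only [List.foldl_cons, ih, List.flatMap_cons, List.any_cons]
    simp [Bool.or_assoc]

-- the two needs_quote scans agree
theorem any_swap (val : List Char) :
    ([' ', '#', ';', '$', '`', '"', '\\'].any (fun c => PySem.Chars.isIn [c] val))
      = val.any (fun c => decide (c ∈ [' ', '#', ';', '$', '`', '"', '\\'])) := by
  simp only [isIn_single]
  rw [Bool.eq_iff_iff]
  simp only [List.any_eq_true, List.contains_iff_mem]
  constructor
  · rintro ⟨c, hm, hv⟩; exact ⟨c, hv, by simpa using hm⟩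
  · rintro ⟨c, hv, hm⟩; exact ⟨c, by simpa using hm, hv⟩

-- the four chained per-character replaces compose to the escape table
theorem chain_eq_esc (s : List Char) :
    ((((s.flatMap (fun c => if c = '\\' then ['\\', '\\'] else [c])).flatMap
        (fun c => if c = '"' then ['\\', '"'] else [c])).flatMap
        (fun c => if c = '$' then ['\\', '$'] else [c])).flatMap
        (fun c => if c = '`' then ['\\', '`'] else [c]))
      = s.flatMap pvEsc := by
  induction s with
  | nil => rfl
  | cons c t ih =>
    simp only [List.flatMap_cons, List.flatMap_append] at *
    rw [ih]
    congr 1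
    by_cases h1 : c = '\\'
    · subst h1; rfl
    by_cases h2 : c = '"'
    · subst h2; rfl
    by_cases h3 : c = '$'
    · subst h3; rfl
    by_cases h4 : c = '`'
    · subst h4; rfl
    simp [pvEsc, h1, h2, h3, h4]

-- ===== VERDICT (by name: the statement is the Claim_ definition above) =====
theorem env_quote_py_spec : Claim_equal_env_quote_py := by
  intro val _
  unfold Spec_env_quote_py env_quote_py env_quote_py_alt
  rw [foldl_pass]
  simp only [List.nil_append]
  have hq : ([' ', '#', ';', '$', '`', '"', '\\'].any
      (fun c => PySem.Str.isIn (String.ofList [c]) val))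
      = val.toList.any (fun c => decide (c ∈ [' ', '#', ';', '$', '`', '"', '\\'])) := by
    have hf : (fun c => PySem.Str.isIn (String.ofList [c]) val)
        = (fun c => PySem.Chars.isIn [c] val.toList) := by
      funext c; simp [PySem.Str.isIn]
    rw [hf, any_swap]
  rw [hq]
  simp only [Bool.false_or]
  split
  · rfl
  · rw [← String.toList_inj]
    simp only [PySem.Str.toList_replace, String.toList_append]
    have e1 : ("\\" : String).toList = ['\\'] := rfl
    have e2 : ("\"" : String).toList = ['"'] := rfl
    have e3 : ("$" : String).toList = ['$'] := rfl
    have e4 : ("`" : String).toList = ['`'] := rfl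
    have e5 : ("\\\\" : String).toList = ['\\', '\\'] := rfl
    have e6 : ("\\\"" : String).toList = ['\\', '"'] := rfl
    have e7 : ("\\$" : String).toList = ['\\', '$'] := rfl
    have e8 : ("\\`" : String).toList = ['\\', '`'] := rfl
    rw [e1, e2, e3, e4, e5, e6, e7, e8,
        replace_single, replace_single, replace_single, replace_single, chain_eq_esc, String.toList_ofList]
    rfl
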